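-- pv_equiv track=rewrite | github.com/yaglm/yaglm | ya_glm/opt/cat_utils.py | get_cat_block_idxs
-- ===== SOURCE A (Python) =====
-- def get_cat_block_idxs(sizes):
--     """
--     Gets the left/right indices for each block in the concatenated vector.
--
--     Parameters
--     ----------
--     sizes: iterable of ints
--         The sizes of each block.
--
--     Output
--     ------
--     block_idxs: list of tuples
--         The left/right indices.
--     """
--     block_idxs = []
--     idx_left = 0
--     idx_right = 0
--     for size in sizes:
--         idx_right += size
--         block_idxs.append((idx_left, idx_right))
--         idx_left += size
--
--     return block_idxs
-- ===== SOURCE B (Python) =====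
-- def get_cat_block_idxs(sizes):
--     # Divide and conquer: compute the blocks of each half independently
--     # (each in its own coordinate frame starting at 0), then shift the
--     # right half's blocks by the total length of the left half.
--     def rec(xs):
--         n = len(xs)
--         if n == 0:
--             return 0, []
--         if n == 1:
--             return xs[0], [(0, xs[0])]
--         mid = n // 2
--         total_l, left = rec(xs[:mid])
--         total_r, right = rec(xs[mid:])
--         return total_l + total_r, left + [(l + total_l, r + total_l) for (l, r) in right]
--     return rec(list(sizes))[1]
-- ===== Notes on version B (the rewrite author's own statement) =====
-- stated objective: alternative
-- what changed: Replaces the forward loop maintaining running left/right sums with a divide-and-conquer recursion: the blocks of each half are computed independently in their own frame and the right half's blocks are shifted by the left half's total length when merged.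
import Mathlib
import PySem

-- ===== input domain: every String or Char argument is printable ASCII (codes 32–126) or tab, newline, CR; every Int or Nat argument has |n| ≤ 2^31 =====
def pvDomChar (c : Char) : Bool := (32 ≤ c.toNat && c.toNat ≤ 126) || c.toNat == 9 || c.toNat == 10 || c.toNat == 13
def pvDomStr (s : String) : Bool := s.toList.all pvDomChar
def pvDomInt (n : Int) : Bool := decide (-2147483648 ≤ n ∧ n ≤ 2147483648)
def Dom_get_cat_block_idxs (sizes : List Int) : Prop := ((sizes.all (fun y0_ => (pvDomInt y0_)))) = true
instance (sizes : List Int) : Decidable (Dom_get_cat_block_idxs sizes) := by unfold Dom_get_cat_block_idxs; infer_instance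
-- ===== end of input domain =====

-- B computes the blocks by divide-and-conquer (solve each half in its own frame, shift-merge) instead of A's forward running-sum loop; return values proved equal.


-- ===== PORT A =====
-- Transliteration of A: fold carrying (block_idxs, idx_left, idx_right).
def get_cat_block_idxs (sizes : List Int) : List (Int × Int) :=
  (sizes.foldl
    (fun (st : List (Int × Int) × Int × Int) size =>
      let idx_right := st.2.2 + size
      let block_idxs := st.1 ++ [(st.2.1, idx_right)]
      let idx_left := st.2.1 + size
      (block_idxs, idx_left, idx_right))
    ([], 0, 0)).1

-- ===== PORT B =====
-- Transliteration of B's inner `rec`: returns (total length, blocks); halves via take/drop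
-- at n // 2 (= Python xs[:mid] / xs[mid:]); the right half's blocks are shifted by the
-- left half's total length when merged.
def catBlocksRec : List Int → Int × List (Int × Int)
  | [] => (0, [])
  | [s] => (s, [(0, s)])
  | x :: y :: rest =>
      let xs := x :: y :: rest
      let mid := xs.length / 2
      let L := catBlocksRec (xs.take mid)
      let R := catBlocksRec (xs.drop mid)
      (L.1 + R.1, L.2 ++ R.2.map (fun p => (p.1 + L.1, p.2 + L.1)))
termination_by xs => xs.length
decreasing_by
  · simp [List.length_take]; omega
  · simp; omega

def get_cat_block_idxs_alt (sizes : List Int) : List (Int × Int) :=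
  (catBlocksRec sizes).2

-- ===== PRECONDITION & SPEC =====
def Spec_get_cat_block_idxs (sizes : List Int) (out : List (Int × Int)) : Prop := out = get_cat_block_idxs_alt sizes
instance (sizes : List Int) (out : List (Int × Int)) : Decidable (Spec_get_cat_block_idxs sizes out) := by unfold Spec_get_cat_block_idxs; infer_instance

-- ===== CLAIM (what is proved, stated in full; the proofs are below) =====
def Claim_equal_get_cat_block_idxs : Prop := ∀ (sizes : List Int), Dom_get_cat_block_idxs sizes → Spec_get_cat_block_idxs sizes (get_cat_block_idxs sizes)

-- ===== LEMMAS AND PROOFS =====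
-- Canonical form both ports are reduced to: blocks built front-to-back by shifting.
def G : List Int → List (Int × Int)
  | [] => []
  | s :: rest => (0, s) :: (G rest).map (fun p => (p.1 + s, p.2 + s))

-- Composing two shifts is shifting by the sum.
theorem G_shift_shift (l : List (Int × Int)) (a b : Int) :
    (l.map (fun p => (p.1 + a, p.2 + a))).map (fun p => (p.1 + b, p.2 + b))
      = l.map (fun p => (p.1 + (a + b), p.2 + (a + b))) := by
  rw [List.map_map]
  apply List.map_congr_left
  intro p _
  simp only [Function.comp, Prod.mk.injEq]
  constructor <;> ring

-- G of a concatenation: left part's blocks, then right part's shifted by the left sum.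
theorem G_append (xs ys : List Int) :
    G (xs ++ ys) = G xs ++ (G ys).map (fun p => (p.1 + xs.sum, p.2 + xs.sum)) := by
  induction xs with
  | nil => simp [G]
  | cons s xs ih =>
      simp only [List.cons_append, G, ih, List.map_append, G_shift_shift, List.sum_cons]
      rw [add_comm xs.sum s]

-- B's divide-and-conquer computes (sum, G).
theorem catBlocksRec_eq (xs : List Int) : catBlocksRec xs = (xs.sum, G xs) := by
  induction xs using catBlocksRec.induct with
  | case1 => simp [catBlocksRec, G]
  | case2 s => simp [catBlocksRec, G]
  | case3 x y rest xs mid ihL ihR =>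
      rw [catBlocksRec]
      rw [ihL, ihR]
      have hsplit := List.take_append_drop mid xs
      simp only [Prod.mk.injEq]
      exact ⟨by rw [← List.sum_append, hsplit], by rw [← G_append, hsplit]⟩

-- A's loop invariant: from state (acc, c, c), the fold appends G shifted by c.
theorem foldA_eq (sizes : List Int) (acc : List (Int × Int)) (c : Int) :
    (sizes.foldl
      (fun (st : List (Int × Int) × Int × Int) size =>
        let idx_right := st.2.2 + size
        let block_idxs := st.1 ++ [(st.2.1, idx_right)]
        let idx_left := st.2.1 + size
        (block_idxs, idx_left, idx_right))
      (acc, c, c)).1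
    = acc ++ (G sizes).map (fun p => (p.1 + c, p.2 + c)) := by
  induction sizes generalizing acc c with
  | nil => simp [G]
  | cons s rest ih =>
      simp only [List.foldl_cons]
      rw [ih]
      simp only [G, List.map_cons, G_shift_shift]
      rw [List.append_assoc]
      simp [add_comm, add_left_comm]

-- ===== VERDICT (by name: the statement is the Claim_ definition above) =====
theorem get_cat_block_idxs_spec : Claim_equal_get_cat_block_idxs := by
  intro sizes _
  unfold Spec_get_cat_block_idxs get_cat_block_idxs get_cat_block_idxs_alt
  rw [catBlocksRec_eq]
  simpa using foldA_eq sizes [] 0
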